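-- pv_equiv track=rewrite | github.com/zeta0134/dpcm-tools | dpcm.py | bias
-- ===== SOURCE A (Python) =====
-- def unpack_bytes_into_bits(byte_array):
--   bit_array = []
--   while len(byte_array) > 0:
--     byte_value = byte_array.pop(0)
--     for i in range(0,8):
--       bit_array.append((byte_value & (1 << i)) >> i)
--   return bit_array
--
-- def bias(dpcm_bytes):
--   bit_array = unpack_bytes_into_bits(list(dpcm_bytes))
--   current_dpcm_level = 0 # signed, also we don't care about range for this
--   while len(bit_array) > 0:
--     sample = bit_array.pop(0)
--     if sample == 1:
--       current_dpcm_level += 2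
--     else:
--       current_dpcm_level -= 2
--   return current_dpcm_level
-- ===== SOURCE B (Python) =====
-- def bias(dpcm_bytes):
--     # popcount closed form: each set bit contributes +2, each clear bit -2,
--     # so bias = 2*set - 2*(8*n - set) = 4*set - 16*n
--     total_set = sum((b & 0xFF).bit_count() for b in dpcm_bytes)
--     return 4 * total_set - 16 * len(dpcm_bytes)
-- ===== Notes on version B (the rewrite author's own statement) =====
-- stated objective: faster
-- what changed: Replaces the per-bit unpacking (building an 8x-long bit list with repeated pop(0)) and the second pop(0) loop by a single pass that popcounts each byte and applies the closed form 4*set_bits - 16*len.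
import Mathlib
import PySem

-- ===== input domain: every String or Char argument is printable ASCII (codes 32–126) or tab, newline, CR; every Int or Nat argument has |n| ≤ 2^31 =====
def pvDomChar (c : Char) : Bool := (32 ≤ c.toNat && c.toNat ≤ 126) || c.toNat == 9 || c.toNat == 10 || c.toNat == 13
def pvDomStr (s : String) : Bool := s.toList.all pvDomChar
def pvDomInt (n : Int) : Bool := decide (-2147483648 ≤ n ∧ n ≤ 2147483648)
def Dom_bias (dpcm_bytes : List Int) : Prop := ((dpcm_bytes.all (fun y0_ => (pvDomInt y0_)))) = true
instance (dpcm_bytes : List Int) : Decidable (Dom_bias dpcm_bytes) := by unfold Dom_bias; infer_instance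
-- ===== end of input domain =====

-- B replaces A's per-bit unpacking (an 8n-long bit list built and consumed with pop(0)) by a
-- single pass that popcounts each byte and uses the closed form 4*set_bits - 16*len.

-- ===== PORT A =====
def unpack_bytes_into_bits (byte_array : List Int) : List Int :=
  match byte_array with
  | [] => []
  | byte_value :: rest =>
      ((PySem.List.pyRange 0 8).map
        (fun i => let j : Nat := i.toNat
                  (PySem.Int.band byte_value ((1 : Int) <<< j)) >>> j))
      ++ unpack_bytes_into_bits rest

def bias (dpcm_bytes : List Int) : Int :=
  (unpack_bytes_into_bits dpcm_bytes).foldl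
    (fun current_dpcm_level sample =>
      if sample = 1 then current_dpcm_level + 2 else current_dpcm_level - 2) 0

-- ===== PORT B =====
def bias_alt (dpcm_bytes : List Int) : Int :=
  4 * (dpcm_bytes.map (fun b => ((PySem.Int.bitCount (PySem.Int.band b 255) : Nat) : Int))).sum
    - 16 * (dpcm_bytes.length : Int)

-- ===== PRECONDITION & SPEC =====
def Spec_bias (dpcm_bytes : List Int) (out : Int) : Prop := out = bias_alt dpcm_bytes
instance (dpcm_bytes : List Int) (out : Int) : Decidable (Spec_bias dpcm_bytes out) := by unfold Spec_bias; infer_instance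

-- ===== CLAIM (what is proved, stated in full; the proofs are below) =====
def Claim_equal_bias : Prop := ∀ (dpcm_bytes : List Int), Dom_bias dpcm_bytes → Spec_bias dpcm_bytes (bias dpcm_bytes)

-- ===== LEMMAS AND PROOFS =====

-- Python b & m for negative b, in terms of the two's-complement magnitude (-b-1).
lemma band_neg_natCast (b : Int) (hb : b < 0) (m : Nat) :
    PySem.Int.band b (m : Int) = ((m - (m &&& (-b - 1).toNat) : Nat) : Int) := by
  simp only [PySem.Int.band]
  rw [if_neg (by omega), if_pos (by positivity)]
  simp

-- bit i of b (i < 8) only depends on b mod 256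
lemma bit_reduce (b : Int) (i : Nat) (hi : i < 8) :
    PySem.Int.band b (((2^i : Nat) : Int)) = PySem.Int.band (PySem.Int.mod b 256) (((2^i : Nat) : Int)) := by
  have hmod : PySem.Int.mod b 256 = b % 256 := PySem.Int.mod_eq_emod_of_pos (by norm_num)
  rw [hmod]
  by_cases hb : 0 ≤ b
  · have hr : b % 256 = ((b.toNat % 256 : Nat) : Int) := by omega
    rw [PySem.Int.band_of_nonneg hb (by positivity), hr, PySem.Int.band_natCast]
    simp only [Int.toNat_natCast]
    congr 1
    apply Nat.eq_of_testBit_eq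
    intro j
    have h8 : (256 : Nat) = 2^8 := by norm_num
    rw [Nat.testBit_and, Nat.testBit_and, h8, Nat.testBit_mod_two_pow, Nat.testBit_two_pow]
    by_cases hj : j = i
    · subst hj; simp [hi]
    · simp [Ne.symm hj]
  · have hb' : b < 0 := by omega
    set k : Nat := (-b - 1).toNat with hk
    have hr : b % 256 = ((255 - k % 256 : Nat) : Int) := by omega
    rw [band_neg_natCast b hb' (2^i), hr, PySem.Int.band_natCast]
    congr 1
    have h1 : 2^i &&& k = k &&& 2^i := Nat.and_comm _ _
    rw [h1, Nat.and_two_pow, Nat.and_two_pow]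
    have h2 : (255 - k % 256) = 2^8 - (k % 256 + 1) := by omega
    rw [h2, Nat.testBit_two_pow_sub_succ (by omega)]
    have h3 : (k % 256).testBit i = k.testBit i := by
      have h8 : (256 : Nat) = 2^8 := by norm_num
      rw [h8, Nat.testBit_mod_two_pow]
      simp [hi]
    rw [h3]
    cases h : k.testBit i <;> simp [hi]

-- Python b & 0xFF is b mod 256
lemma band255 (b : Int) : PySem.Int.band b 255 = PySem.Int.mod b 256 := by
  have hmod : PySem.Int.mod b 256 = b % 256 := PySem.Int.mod_eq_emod_of_pos (by norm_num)
  rw [hmod]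
  by_cases hb : 0 ≤ b
  · rw [PySem.Int.band_of_nonneg hb (by norm_num)]
    have h255 : (255 : Int).toNat = 2^8 - 1 := by decide
    rw [h255, Nat.and_two_pow_sub_one_eq_mod]
    omega
  · have hb' : b < 0 := by omega
    have hcast : ((255 : Nat) : Int) = 255 := by norm_num
    rw [← hcast, band_neg_natCast b hb' 255]
    have h2 : (255 : Nat) &&& (-b - 1).toNat = (-b - 1).toNat % 256 := by
      rw [Nat.and_comm]
      have : (255 : Nat) = 2^8 - 1 := by decide
      rw [this, Nat.and_two_pow_sub_one_eq_mod]
    rw [h2]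
    omega

-- the 8 bit samples A extracts from one byte
def byteBits (b : Int) : List Int :=
  (PySem.List.pyRange 0 8).map
    (fun i => let j : Nat := i.toNat
              (PySem.Int.band b ((1 : Int) <<< j)) >>> j)

-- A's accumulator step
def stepA (lvl sample : Int) : Int := if sample = 1 then lvl + 2 else lvl - 2

lemma byteBits_mod (b : Int) : byteBits b = byteBits (PySem.Int.mod b 256) := by
  unfold byteBits
  apply List.map_congr_left
  intro i hi
  rw [PySem.List.mem_pyRange_one] at hi
  show (PySem.Int.band b ((1 : Int) <<< i.toNat)) >>> i.toNat = _
  have hpow : ((1 : Int) <<< i.toNat) = ((2 ^ i.toNat : Nat) : Int) := by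
    simp [Int.shiftLeft_eq]
  rw [hpow, bit_reduce b i.toNat (by omega)]
  rw [← hpow]

lemma foldl_stepA_acc (xs : List Int) : ∀ acc : Int,
    List.foldl stepA acc xs = acc + List.foldl stepA 0 xs := by
  induction xs with
  | nil => intro acc; simp
  | cons x xs ih =>
      intro acc
      simp only [List.foldl_cons]
      rw [ih (stepA acc x), ih (stepA 0 x)]
      unfold stepA
      split_ifs <;> ring

set_option maxRecDepth 4096 in
lemma core_fin : ∀ m : Fin 256,
    List.foldl stepA 0 (byteBits (m.val : Int)) = 4 * ((PySem.Int.bitCount (m.val : Int) : Nat) : Int) - 16 := by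
  decide

lemma per_byte (b : Int) (acc : Int) :
    List.foldl stepA acc (byteBits b) =
      acc + (4 * ((PySem.Int.bitCount (PySem.Int.band b 255) : Nat) : Int) - 16) := by
  rw [foldl_stepA_acc, byteBits_mod, band255]
  have h0 : 0 ≤ PySem.Int.mod b 256 := PySem.Int.mod_nonneg b (by norm_num)
  have h1 : PySem.Int.mod b 256 < 256 := PySem.Int.mod_lt b (by norm_num)
  have hm : PySem.Int.mod b 256 = (((PySem.Int.mod b 256).toNat : Nat) : Int) := by omega
  rw [hm]
  exact congrArg₂ _ rfl (core_fin ⟨(PySem.Int.mod b 256).toNat, by omega⟩)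

lemma unpack_eq (l : List Int) :
    unpack_bytes_into_bits l = l.flatMap byteBits := by
  induction l with
  | nil => rfl
  | cons b rest ih => simp [unpack_bytes_into_bits, byteBits, ih, List.flatMap_cons]

lemma bias_foldl (l : List Int) : ∀ acc : Int,
    List.foldl stepA acc (l.flatMap byteBits) =
      acc + bias_alt l := by
  induction l with
  | nil => intro acc; simp [bias_alt]
  | cons b rest ih =>
      intro acc
      rw [List.flatMap_cons, List.foldl_append, per_byte, ih]
      simp only [bias_alt, List.map_cons, List.sum_cons, List.length_cons]
      push_cast
      ring

-- ===== VERDICT (by name: the statement is the Claim_ definition above) =====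
theorem bias_spec : Claim_equal_bias := by
  intro l _
  unfold Spec_bias bias
  rw [unpack_eq]
  have h := bias_foldl l 0
  simpa [stepA] using h
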